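-- pv_equiv track=rewrite | github.com/agh-bit-academy/SummerProject2022 | WDI/Zestaw_3/Zadanie_16/sol.py | f
-- ===== SOURCE A (Python) =====
-- from math import inf
--
-- def f(A):
--     n = len(A)
--     max_el = -inf
--     min_el = inf
--     max_cnt = 0
--     min_cnt = 0
--     for i in range(n):
--         if A[i] > max_el:
--             max_el = A[i]
--             max_cnt = 1
--         elif A[i] == max_el:
--             max_cnt += 1
--         if A[i] < min_el:
--             min_el = A[i]
--             min_cnt = 1
--         elif A[i] == min_el:
--             min_cnt += 1
--
--     if min_cnt == max_cnt == 1: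
--         return True
--     return False
-- ===== SOURCE B (Python) =====
-- def f(A):
--     if not A:
--         return False
--     return A.count(max(A)) == 1 and A.count(min(A)) == 1
-- ===== Notes on version B (the rewrite author's own statement) =====
-- stated objective: simpler
-- what changed: Replaces the hand-rolled single-pass extrema-with-counts loop (sentinel +/-inf, four state variables) by an empty guard plus built-in max/min and list.count scans.
import Mathlib
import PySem

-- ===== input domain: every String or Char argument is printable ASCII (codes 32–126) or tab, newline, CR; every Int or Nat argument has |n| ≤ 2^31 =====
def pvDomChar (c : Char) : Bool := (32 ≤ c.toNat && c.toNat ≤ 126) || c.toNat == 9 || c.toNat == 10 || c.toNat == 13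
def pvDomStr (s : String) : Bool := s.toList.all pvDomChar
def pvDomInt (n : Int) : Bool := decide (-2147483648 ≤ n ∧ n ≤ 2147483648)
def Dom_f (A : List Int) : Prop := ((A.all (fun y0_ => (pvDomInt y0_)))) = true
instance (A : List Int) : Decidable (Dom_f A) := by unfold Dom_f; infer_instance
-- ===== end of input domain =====

-- B replaces A's single-pass four-variable extrema/count loop by an empty guard plus
-- built-in max/min and count scans (objective: simpler; same O(n) cost).

-- ===== PORT A =====
-- state = (max_el, max_cnt, min_el, min_cnt); 'none' encodes the -inf / inf sentinels
def fStep (st : Option Int × Nat × Option Int × Nat) (x : Int) :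
    Option Int × Nat × Option Int × Nat :=
  let (mxe, mxc, mne, mnc) := st
  let p : Option Int × Nat :=
    match mxe with
    | none => (some x, 1)                     -- x > -inf
    | some m => if x > m then (some x, 1)
                else if x = m then (some m, mxc + 1)
                else (some m, mxc)
  let q : Option Int × Nat :=
    match mne with
    | none => (some x, 1)                     -- x < inf
    | some m => if x < m then (some x, 1)
                else if x = m then (some m, mnc + 1)
                else (some m, mnc)
  (p.1, p.2, q.1, q.2)

def f (A : List Int) : Bool :=
  let st := A.foldl fStep (none, 0, none, 0)
  if st.2.2.2 = st.2.1 ∧ st.2.1 = 1 then true else false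

-- ===== PORT B =====
def f_alt (A : List Int) : Bool :=
  match A with
  | [] => false
  | x :: t =>
    match PySem.List.max? (x :: t) (fun y => y), PySem.List.min? (x :: t) (fun y => y) with
    | some mx, some mn =>
        decide (PySem.List.count (x :: t) mx = 1) && decide (PySem.List.count (x :: t) mn = 1)
    | _, _ => false

-- ===== PRECONDITION & SPEC =====
def Spec_f (A : List Int) (out : Bool) : Prop := out = f_alt A
instance (A : List Int) (out : Bool) : Decidable (Spec_f A out) := by unfold Spec_f; infer_instance

-- ===== CLAIM (what is proved, stated in full; the proofs are below) =====
def Claim_equal_f : Prop := ∀ (A : List Int), Dom_f A → Spec_f A (f A)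

-- ===== LEMMAS AND PROOFS =====

-- the two independent halves of A's loop body
def maxStep (s : Int × Nat) (x : Int) : Int × Nat :=
  if x > s.1 then (x, 1) else if x = s.1 then (s.1, s.2 + 1) else s

def minStep (s : Int × Nat) (x : Int) : Int × Nat :=
  if x < s.1 then (x, 1) else if x = s.1 then (s.1, s.2 + 1) else s

-- A's fold splits into the two independent component folds
theorem fold_decomp (l : List Int) : ∀ (m : Int) (mc : Nat) (n : Int) (nc : Nat),
    l.foldl fStep (some m, mc, some n, nc) =
      (some (l.foldl maxStep (m, mc)).1, (l.foldl maxStep (m, mc)).2,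
       some (l.foldl minStep (n, nc)).1, (l.foldl minStep (n, nc)).2) := by
  induction l with
  | nil => intro m mc n nc; simp [List.foldl]
  | cons x t ih =>
    intro m mc n nc
    simp only [List.foldl]
    have hstep : fStep (some m, mc, some n, nc) x =
        (some (maxStep (m, mc) x).1, (maxStep (m, mc) x).2,
         some (minStep (n, nc) x).1, (minStep (n, nc) x).2) := by
      simp only [fStep, maxStep, minStep]
      split_ifs <;> simp
    rw [hstep]
    have := ih (maxStep (m, mc) x).1 (maxStep (m, mc) x).2 (minStep (n, nc) x).1 (minStep (n, nc) x).2
    simpa using this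

-- running max with counts, characterised
theorem maxStep_char (l : List Int) : ∀ (m : Int) (mc : Nat),
    l.foldl maxStep (m, mc) =
      (l.foldl max m, (if l.foldl max m = m then mc else 0) + l.count (l.foldl max m)) := by
  induction l with
  | nil => intro m mc; simp [List.foldl]
  | cons x t ih =>
    intro m mc
    have hx := (PySem.List.le_foldl_max t x).1
    have hm := (PySem.List.le_foldl_max t m).1
    simp only [List.foldl, maxStep]
    rcases lt_trichotomy m x with h | h | h
    · have hmx : max m x = x := by omega
      rw [if_pos h, ih]; simp only [hmx]
      have hne : t.foldl max x ≠ m := by omega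
      simp only [List.count_cons, if_neg hne]
      simp only [Prod.mk.injEq, true_and]
      · by_cases hq : t.foldl max x = x
        · simp [hq] <;> omega
        · simp [hq, Ne.symm hq] <;> omega
    · have hmx : max m x = m := by omega
      rw [if_neg (by omega), if_pos h.symm, ih]; simp only [hmx]
      simp only [List.count_cons]
      simp only [Prod.mk.injEq, true_and]
      · subst h
        by_cases hq : t.foldl max m = m
        · simp [hq] <;> omega
        · simp [hq, Ne.symm hq] <;> omega
    · have hmx : max m x = m := by omega
      rw [if_neg (by omega), if_neg (by omega), ih]; simp only [hmx]
      have hne : t.foldl max m ≠ x := by omega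
      simp only [List.count_cons, if_neg hne]
      simp only [Prod.mk.injEq, true_and]
      · simp [Ne.symm hne]
  
theorem minStep_char (l : List Int) : ∀ (n : Int) (nc : Nat),
    l.foldl minStep (n, nc) =
      (l.foldl min n, (if l.foldl min n = n then nc else 0) + l.count (l.foldl min n)) := by
  induction l with
  | nil => intro n nc; simp [List.foldl]
  | cons x t ih =>
    intro n nc
    have hx := (PySem.List.foldl_min_le t x).1
    have hm := (PySem.List.foldl_min_le t n).1
    simp only [List.foldl, minStep]
    rcases lt_trichotomy x n with h | h | h
    · have hmn : min n x = x := by omega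
      rw [if_pos h, ih]; simp only [hmn]
      have hne : t.foldl min x ≠ n := by omega
      simp only [List.count_cons, if_neg hne]
      simp only [Prod.mk.injEq, true_and]
      · by_cases hq : t.foldl min x = x
        · simp [hq] <;> omega
        · simp [hq, Ne.symm hq] <;> omega
    · have hmn : min n x = n := by omega
      rw [if_neg (by omega), if_pos h, ih]; simp only [hmn]
      simp only [List.count_cons]
      simp only [Prod.mk.injEq, true_and]
      · subst h
        by_cases hq : t.foldl min x = x
        · simp [hq] <;> omega
        · simp [hq, Ne.symm hq] <;> omega
    · have hmn : min n x = n := by omega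
      rw [if_neg (by omega), if_neg (by omega), ih]; simp only [hmn]
      have hne : t.foldl min n ≠ x := by omega
      simp only [List.count_cons, if_neg hne]
      simp only [Prod.mk.injEq, true_and]
      · simp [Ne.symm hne]

-- ===== VERDICT (by name: the statement is the Claim_ definition above) =====
theorem f_spec : Claim_equal_f := by
  intro A _
  unfold Spec_f
  match A with
  | [] => rfl
  | x :: t =>
    simp only [f, List.foldl]
    have h0 : fStep (none, 0, none, 0) x = (some x, 1, some x, 1) := rfl
    simp only [h0, fold_decomp, maxStep_char, minStep_char]
    simp only [f_alt, PySem.List.max?_id_cons, PySem.List.min?_id_cons, PySem.List.count_eq]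
    set M := t.foldl max x with hM
    set N := t.foldl min x with hN
    have hcM : (x :: t).count M = (if M = x then 1 else 0) + t.count M := by
      simp only [List.count_cons]
      by_cases hq : M = x
      · simp [hq] <;> omega
      · simp [hq, Ne.symm hq] <;> omega
    have hcN : (x :: t).count N = (if N = x then 1 else 0) + t.count N := by
      simp only [List.count_cons]
      by_cases hq : N = x
      · simp [hq] <;> omega
      · simp [hq, Ne.symm hq] <;> omega
    simp only [hcM, hcN]
    by_cases h1 : (if M = x then 1 else 0) + t.count M = 1 <;>
      by_cases h2 : (if N = x then 1 else 0) + t.count N = 1 <;>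
      simp [h1, h2] <;> omega
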